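-- pv_equiv track=rewrite | github.com/ajeseung/Coding_test_practice | 프로그래머스/2/150368. 이모티콘 할인행사/이모티콘 할인행사.py | solution
-- ===== SOURCE A (Python) =====
-- from itertools import product
--
-- def solution(users, emoticons):
--     answer = [0,0]
--
--     discounts = [10,20,30,40]
--     n = len(emoticons)
--
--     for rates in product(discounts, repeat=n):
--         plus_users = 0
--         total_sales = 0
--
--
--         for user_discount, user_threshold in users:
--             user_total= 0
--
--             for i in range(n):
--                 if rates[i] >= user_discount:
--                     discounted_price = emoticons[i] *(100-rates[i]) // 100
--                     user_total += discounted_price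
--
--             if user_total >= user_threshold:
--                 plus_users += 1
--
--             else:
--                 total_sales += user_total
--
--         if plus_users > answer[0] or (plus_users == answer[0] and total_sales > answer[1]):
--             answer = [plus_users, total_sales]
--
--     return answer
-- ===== SOURCE B (Python) =====
-- def solution(users, emoticons):
--     n = len(emoticons)
--     best = [0, 0]
--
--     def assign(i, totals):
--         nonlocal best
--         if i == n:
--             buyers = 0
--             sales = 0
--             for total, (_, threshold) in zip(totals, users):
--                 if total >= threshold:
--                     buyers += 1
--                 else:
--                     sales += total
--             if buyers > best[0] or (buyers == best[0] and sales > best[1]):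
--                 best = [buyers, sales]
--             return
--         for rate in (10, 20, 30, 40):
--             price = emoticons[i] * (100 - rate) // 100
--             assign(i + 1, [t + (price if rate >= disc else 0)
--                            for t, (disc, _) in zip(totals, users)])
--
--     assign(0, [0] * len(users))
--     return best
-- ===== Notes on version B (the rewrite author's own statement) =====
-- stated objective: alternative
-- what changed: Replaced itertools.product enumeration that recomputes every user's discounted sum per combination with a recursive DFS over emoticons that carries incremental per-user totals and evaluates buyers/sales only at the leaves.
import Mathlib
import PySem

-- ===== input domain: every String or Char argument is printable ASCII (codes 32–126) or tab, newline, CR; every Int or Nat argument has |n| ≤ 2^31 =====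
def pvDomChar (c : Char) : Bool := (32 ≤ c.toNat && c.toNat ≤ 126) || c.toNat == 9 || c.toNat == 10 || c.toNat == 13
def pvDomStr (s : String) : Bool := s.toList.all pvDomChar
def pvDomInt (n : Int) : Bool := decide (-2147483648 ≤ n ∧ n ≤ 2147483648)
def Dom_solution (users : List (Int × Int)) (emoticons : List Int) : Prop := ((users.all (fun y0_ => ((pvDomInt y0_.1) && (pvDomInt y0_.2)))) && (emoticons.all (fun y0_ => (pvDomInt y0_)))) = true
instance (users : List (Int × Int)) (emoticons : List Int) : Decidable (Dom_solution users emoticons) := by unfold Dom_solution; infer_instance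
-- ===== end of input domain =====

-- B replaces A's itertools.product enumeration (recomputing every user's sum per combination)
-- by a recursive DFS that carries incremental per-user discounted totals down the tree (objective: alternative).

-- ===== PORT A =====
-- itertools.product([10,20,30,40], repeat=n), in Python's iteration order (first coordinate slowest)
def pvProd : Nat → List (List Int)
  | 0 => [[]]
  | n + 1 => ([10, 20, 30, 40] : List Int).flatMap (fun r => (pvProd n).map (fun rest => r :: rest))

def solution (users : List (Int × Int)) (emoticons : List Int) : List Int :=
  let n := emoticons.length
  let answer := (pvProd n).foldl (fun (answer : Int × Int) rates =>
    let t := users.foldl (fun (acc : Int × Int) u =>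
      let userTotal := (PySem.List.pyRange 0 (n : Int) 1).foldl (fun ut i =>
        let ri := PySem.List.pyGetD rates i 0
        if ri ≥ u.1 then
          ut + PySem.Int.floordiv (PySem.List.pyGetD emoticons i 0 * (100 - ri)) 100
        else ut) 0
      if userTotal ≥ u.2 then (acc.1 + 1, acc.2) else (acc.1, acc.2 + userTotal)) (0, 0)
    if t.1 > answer.1 ∨ (t.1 = answer.1 ∧ t.2 > answer.2) then t else answer) (0, 0)
  [answer.1, answer.2]

-- ===== PORT B =====
-- leaf: count buyers / sum remaining sales from the accumulated totals
def pvLeaf (users : List (Int × Int)) (totals : List Int) : Int × Int :=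
  (totals.zip users).foldl (fun (acc : Int × Int) p =>
    if p.1 ≥ p.2.2 then (acc.1 + 1, acc.2) else (acc.1, acc.2 + p.1)) (0, 0)

-- one DFS edge: add the discounted price to each user whose threshold the rate meets
def pvStep (users : List (Int × Int)) (totals : List Int) (price r : Int) : List Int :=
  (totals.zip users).map (fun p => p.1 + (if r ≥ p.2.1 then price else 0))

def pvAssign (users : List (Int × Int)) : List Int → List Int → Int × Int → Int × Int
  | [], totals, best =>
      let l := pvLeaf users totals
      if l.1 > best.1 ∨ (l.1 = best.1 ∧ l.2 > best.2) then l else best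
  | e :: rest, totals, best =>
      ([10, 20, 30, 40] : List Int).foldl
        (fun b r => pvAssign users rest (pvStep users totals (PySem.Int.floordiv (e * (100 - r)) 100) r) b) best

def solution_alt (users : List (Int × Int)) (emoticons : List Int) : List Int :=
  let best := pvAssign users emoticons (users.map (fun _ => (0 : Int))) (0, 0)
  [best.1, best.2]

-- ===== PRECONDITION & SPEC =====
def Spec_solution (users : List (Int × Int)) (emoticons : List Int) (out : List Int) : Prop := out = solution_alt users emoticons
instance (users : List (Int × Int)) (emoticons : List Int) (out : List Int) : Decidable (Spec_solution users emoticons out) := by unfold Spec_solution; infer_instance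

-- ===== CLAIM (what is proved, stated in full; the proofs are below) =====
def Claim_equal_solution : Prop := ∀ (users : List (Int × Int)) (emoticons : List Int), Dom_solution users emoticons → Spec_solution users emoticons (solution users emoticons)

-- ===== LEMMAS AND PROOFS =====

-- per-user discounted spend over a rate/price assignment, as a sum
def pvS (d : Int) (l : List (Int × Int)) : Int :=
  (l.map (fun p => if p.1 ≥ d then PySem.Int.floordiv (p.2 * (100 - p.1)) 100 else 0)).sum

theorem pvProd_mem_length {n : Nat} {rates : List Int} (h : rates ∈ pvProd n) : rates.length = n := by
  induction n generalizing rates with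
  | zero => simp [pvProd] at h; simp [h]
  | succ k ih =>
      simp [pvProd] at h
      rcases h with ⟨a, ha, rfl⟩ | ⟨a, ha, rfl⟩ | ⟨a, ha, rfl⟩ | ⟨a, ha, rfl⟩ <;> simp [ih ha]

theorem pv_foldl_flatMap {α β γ : Type} (l : List α) (g : α → List β) (f : γ → β → γ) (b : γ) :
    (l.flatMap g).foldl f b = l.foldl (fun b a => (g a).foldl f b) b := by
  induction l generalizing b with
  | nil => rfl
  | cons x xs ih => simp [List.flatMap_cons, List.foldl_append, ih]

theorem pv_zip_map {γ : Type} (totals : List Int) (users : List (Int × Int))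
    (g : Int × (Int × Int) → Int) (f : Int × (Int × Int) → γ) (h : totals.length = users.length) :
    (((totals.zip users).map g).zip users).map f
      = (totals.zip users).map (fun p => f (g p, p.2)) := by
  induction totals generalizing users with
  | nil => simp
  | cons t ts ih =>
      cases users with
      | nil => simp at h
      | cons u us =>
          simp only [List.length_cons, Nat.add_right_cancel_iff] at h
          simp [ih us h]

-- A's range(n) inner loop computes pvS over rates.zip emoticons
theorem pv_userTotal_eq (rates emos : List Int) (d : Int) (h : rates.length = emos.length) :
    (PySem.List.pyRange 0 (emos.length : Int) 1).foldl (fun ut i =>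
        let ri := PySem.List.pyGetD rates i 0
        if ri ≥ d then
          ut + PySem.Int.floordiv (PySem.List.pyGetD emos i 0 * (100 - ri)) 100
        else ut) 0 = pvS d (rates.zip emos) := by
  have hcast : ((emos.length : Int)) = (((rates.zip emos).length : Int)) := by
    simp [List.length_zip, h]
  rw [hcast]
  have h1 : ∀ (acc : Int), ∀ i ∈ PySem.List.pyRange 0 (((rates.zip emos).length : Int)) 1,
      (fun ut i =>
        let ri := PySem.List.pyGetD rates i 0
        if ri ≥ d then
          ut + PySem.Int.floordiv (PySem.List.pyGetD emos i 0 * (100 - ri)) 100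
        else ut) acc i
      = (fun acc j => (fun ut (p : Int × Int) => if p.1 ≥ d then ut + PySem.Int.floordiv (p.2 * (100 - p.1)) 100 else ut) acc (PySem.List.pyGetD (rates.zip emos) j ((0:Int),(0:Int)))) acc i := by
    intro acc i hi
    rw [PySem.List.mem_pyRange_one] at hi
    obtain ⟨h0, hlt⟩ := hi
    have hz : (rates.zip emos).length = rates.length := by simp [List.length_zip, h]
    have hlt1 : i < (rates.length : Int) := by rw [hz] at hlt; exact hlt
    have hlt2 : i < (emos.length : Int) := by omega
    simp only []
    rw [PySem.List.pyGetD_eq_getElem _ _ h0 hlt, PySem.List.pyGetD_eq_getElem _ _ h0 hlt1,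
        PySem.List.pyGetD_eq_getElem _ _ h0 hlt2]
    simp [List.getElem_zip]
  refine Eq.trans (PySem.List.foldl_congr_mem _ _ _ _ h1) ?_
  refine Eq.trans (PySem.List.foldl_pyRange_zero_pyGetD' (rates.zip emos) ((0:Int),(0:Int)) (fun ut (p : Int × Int) => if p.1 ≥ d then ut + PySem.Int.floordiv (p.2 * (100 - p.1)) 100 else ut) 0) ?_
  have hb : (fun (ut : Int) (p : Int × Int) => if p.1 ≥ d then ut + PySem.Int.floordiv (p.2 * (100 - p.1)) 100 else ut)
      = fun ut p => ut + (if p.1 ≥ d then PySem.Int.floordiv (p.2 * (100 - p.1)) 100 else 0) := by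
    funext ut p; split_ifs <;> ring
  rw [hb, PySem.List.foldl_add, pvS, zero_add]

-- DFS with accumulated totals = fold over the full product, totals shifted by pvS
theorem pv_assign_eq (emos : List Int) (users : List (Int × Int)) (totals : List Int)
    (best : Int × Int) (h : totals.length = users.length) :
    pvAssign users emos totals best
      = (pvProd emos.length).foldl (fun b rates =>
          let t := pvLeaf users ((totals.zip users).map (fun p => p.1 + pvS p.2.1 (rates.zip emos)))
          if t.1 > b.1 ∨ (t.1 = b.1 ∧ t.2 > b.2) then t else b) best := by
  induction emos generalizing totals best with
  | nil =>
      simp only [pvAssign, pvProd, List.length_nil, List.foldl_cons, List.foldl_nil]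
      have : ((totals.zip users).map (fun p => p.1 + pvS p.2.1 (([] : List Int).zip ([] : List Int)))) = totals := by
        simp only [List.zip_nil_right, pvS, List.map_nil, List.sum_nil, add_zero]
        exact List.map_fst_zip (le_of_eq h)
      rw [this]
  | cons e rest ih =>
      simp only [pvAssign, List.length_cons]
      have hlen : ∀ price r, (pvStep users totals price r).length = users.length := by
        intro price r; simp [pvStep, List.length_zip, h]
      have hfun : (fun (b : Int × Int) (r : Int) =>
          pvAssign users rest (pvStep users totals (PySem.Int.floordiv (e * (100 - r)) 100) r) b)
          = (fun b r => (pvProd rest.length).foldl (fun b rates =>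
              let t := pvLeaf users ((totals.zip users).map
                (fun p => p.1 + pvS p.2.1 ((r :: rates).zip (e :: rest))))
              if t.1 > b.1 ∨ (t.1 = b.1 ∧ t.2 > b.2) then t else b) b) := by
        funext b r
        rw [ih (pvStep users totals (PySem.Int.floordiv (e * (100 - r)) 100) r) b (hlen _ _)]
        congr 1
        funext b' rates
        have : ((pvStep users totals (PySem.Int.floordiv (e * (100 - r)) 100) r).zip users).map
            (fun p => p.1 + pvS p.2.1 (rates.zip rest))
            = (totals.zip users).map (fun p => p.1 + pvS p.2.1 ((r :: rates).zip (e :: rest))) := by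
          rw [pvStep, pv_zip_map totals users
                (fun p => p.1 + if r ≥ p.2.1 then PySem.Int.floordiv (e * (100 - r)) 100 else 0)
                (fun p => p.1 + pvS p.2.1 (rates.zip rest)) h]
          refine List.map_congr_left ?_
          intro p _
          simp only [pvS, List.zip_cons_cons, List.map_cons, List.sum_cons]
          split_ifs <;> ring
        rw [this]
      rw [hfun]
      show _ = (pvProd (rest.length + 1)).foldl _ best
      rw [show pvProd (rest.length + 1)
            = ([10, 20, 30, 40] : List Int).flatMap (fun r => (pvProd rest.length).map (fun t => r :: t)) from rfl]
      rw [pv_foldl_flatMap]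
      refine PySem.List.foldl_congr_mem _ _ _ _ ?_
      intro b r _
      rw [List.foldl_map]

theorem pv_zip_map_self {α β : Type} (users : List α) (f : α → β) :
    (users.map f).zip users = users.map (fun u => (f u, u)) := by
  induction users with
  | nil => rfl
  | cons u us ih => simp [ih]

-- ===== VERDICT (by name: the statement is the Claim_ definition above) =====
theorem solution_spec : Claim_equal_solution := by
  intro users emoticons _
  unfold Spec_solution
  have hz : (users.map (fun _ => (0 : Int))).length = users.length := by simp
  have hmain : (pvProd emoticons.length).foldl (fun (answer : Int × Int) rates =>
      let t := users.foldl (fun (acc : Int × Int) u =>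
        let userTotal := (PySem.List.pyRange 0 (emoticons.length : Int) 1).foldl (fun ut i =>
          let ri := PySem.List.pyGetD rates i 0
          if ri ≥ u.1 then
            ut + PySem.Int.floordiv (PySem.List.pyGetD emoticons i 0 * (100 - ri)) 100
          else ut) 0
        if userTotal ≥ u.2 then (acc.1 + 1, acc.2) else (acc.1, acc.2 + userTotal)) (0, 0)
      if t.1 > answer.1 ∨ (t.1 = answer.1 ∧ t.2 > answer.2) then t else answer) (0, 0)
      = pvAssign users emoticons (users.map (fun _ => (0 : Int))) (0, 0) := by
    rw [pv_assign_eq emoticons users _ (0, 0) hz]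
    refine PySem.List.foldl_congr_mem _ _ _ _ ?_
    intro b rates hmem
    have hrl : rates.length = emoticons.length := pvProd_mem_length hmem
    have hleaf : users.foldl (fun (acc : Int × Int) u =>
        let userTotal := (PySem.List.pyRange 0 (emoticons.length : Int) 1).foldl (fun ut i =>
          let ri := PySem.List.pyGetD rates i 0
          if ri ≥ u.1 then
            ut + PySem.Int.floordiv (PySem.List.pyGetD emoticons i 0 * (100 - ri)) 100
          else ut) 0
        if userTotal ≥ u.2 then (acc.1 + 1, acc.2) else (acc.1, acc.2 + userTotal)) (0, 0)
        = pvLeaf users (((users.map (fun _ => (0 : Int))).zip users).map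
            (fun p => p.1 + pvS p.2.1 (rates.zip emoticons))) := by
      rw [pv_zip_map_self users (fun _ => (0 : Int)), List.map_map, pvLeaf,
          pv_zip_map_self users _, List.foldl_map]
      refine PySem.List.foldl_congr_mem _ _ _ _ ?_
      intro acc u _
      simp only [Function.comp, pv_userTotal_eq rates emoticons u.1 hrl, zero_add]
    simp only [hleaf]
  simp only [solution, solution_alt, hmain]
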